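-- pv_equiv track=rewrite | github.com/Adelin-Pachedzhiev/Electricity-cut-notifier | main.py | filter_cuts_by_city
-- ===== SOURCE A (Python) =====
-- def filter_cuts_by_city(cuts, cities):
--     """
--     Filters electricity cuts to only include specified cities.
--
--     Args:
--         cuts: List of cut entry dicts
--         cities: List of city names to match (case-insensitive)
--
--     Returns:
--         list: Filtered cuts that match the specified cities
--     """
--     if not cities:
--         return cuts
--
--     filtered = []
--     cities_upper = [city.upper() for city in cities]
--
--     for cut in cuts:
--         location = cut['location'].upper()
--
--         # Check if any of the monitored cities appear in the location
--         for city in cities_upper: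
--             if city in location:
--                 filtered.append(cut)
--                 break
--
--     return filtered
-- ===== SOURCE B (Python) =====
-- def _matches_at_any_offset(location, cities_upper):
--     # single left-to-right scan of the location: at each offset, test whether
--     # some city matches there (naive multi-pattern matcher)
--     for i in range(len(location) + 1):
--         for city in cities_upper:
--             if location.startswith(city, i):
--                 return True
--     return False
--
--
-- def filter_cuts_by_city(cuts, cities):
--     if not cities:
--         return cuts
--     cities_upper = [city.upper() for city in cities]
--     out = []
--     for cut in cuts:
--         if _matches_at_any_offset(cut['location'].upper(), cities_upper):
--             out.append(cut)
--     return out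
-- ===== Notes on version B (the rewrite author's own statement) =====
-- stated objective: alternative
-- what changed: Instead of testing each city with a separate substring search ('city in location'), B scans each location once left-to-right and at every offset checks whether some uppercased city matches there (a naive multi-pattern matcher, the hand-rolled analogue of one combined automaton scan).
import Mathlib
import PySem

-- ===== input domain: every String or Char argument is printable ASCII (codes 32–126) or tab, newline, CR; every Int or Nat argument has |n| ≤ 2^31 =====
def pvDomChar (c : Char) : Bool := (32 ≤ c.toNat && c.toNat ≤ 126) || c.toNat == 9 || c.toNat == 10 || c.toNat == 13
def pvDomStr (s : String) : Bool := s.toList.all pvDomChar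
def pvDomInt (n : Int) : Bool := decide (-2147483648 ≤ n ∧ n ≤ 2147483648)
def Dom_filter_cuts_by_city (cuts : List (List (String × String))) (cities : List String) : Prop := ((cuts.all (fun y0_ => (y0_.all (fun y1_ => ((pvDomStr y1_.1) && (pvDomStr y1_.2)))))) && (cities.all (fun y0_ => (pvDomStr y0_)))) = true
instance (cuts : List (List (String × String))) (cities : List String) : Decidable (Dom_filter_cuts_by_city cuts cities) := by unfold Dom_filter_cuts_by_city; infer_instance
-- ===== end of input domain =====

-- B replaces the per-city substring searches by one left-to-right scan of each
-- location that tests every offset against all uppercased cities (alternative, same cost).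


-- ===== PORT A =====
-- cut['location']: first-match lookup in the association list; Pre_ guarantees the key
-- is present (Python raises KeyError otherwise), so the .getD "" default is never used inside Pre_.
def filter_cuts_by_city (cuts : List (List (String × String))) (cities : List String) : List (List (String × String)) :=
  if cities = [] then cuts
  else
    let cities_upper := cities.map PySem.Str.upper
    cuts.foldl (fun filtered cut =>
      let location := PySem.Str.upper (((PySem.Dict.mk cut).get? "location").getD "")
      -- 'for city in cities_upper: if city in location: append; break'
      if cities_upper.any (fun city => PySem.Str.isIn city location) then filtered ++ [cut]
      else filtered) []

-- ===== PORT B =====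
-- one scan per location: location.startswith(city, i) for each offset i
def bMatchesAtAnyOffset (location : List Char) (cities_upper : List (List Char)) : Bool :=
  (List.range (location.length + 1)).any (fun i =>
    cities_upper.any (fun city => PySem.Chars.startswith (location.drop i) city))

def filter_cuts_by_city_alt (cuts : List (List (String × String))) (cities : List String) : List (List (String × String)) :=
  if cities = [] then cuts
  else
    let cities_upper := cities.map (fun city => (PySem.Str.upper city).toList)
    cuts.foldl (fun out cut =>
      if bMatchesAtAnyOffset (PySem.Str.upper (((PySem.Dict.mk cut).get? "location").getD "")).toList cities_upper
      then out ++ [cut] else out) []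

-- ===== PRECONDITION & SPEC =====
-- Pre_ excludes only inputs where Python A raises KeyError: some cut lacks a 'location' key
-- while cities is nonempty (with cities == [] A returns cuts untouched).
def Pre_filter_cuts_by_city (cuts : List (List (String × String))) (cities : List String) : Prop :=
  cities = [] ∨ ∀ cut ∈ cuts, ((PySem.Dict.mk cut).get? "location").isSome = true
instance (cuts : List (List (String × String))) (cities : List String) : Decidable (Pre_filter_cuts_by_city cuts cities) := by unfold Pre_filter_cuts_by_city; infer_instance
def pvWitness_filter_cuts_by_city : (List (List (String × String))) × List String :=
  ([[("location", "Sofia, Center")], [("location", "Plovdiv")]], ["sofia"])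

def Spec_filter_cuts_by_city (cuts : List (List (String × String))) (cities : List String) (out : List (List (String × String))) : Prop := out = filter_cuts_by_city_alt cuts cities
instance (cuts : List (List (String × String))) (cities : List String) (out : List (List (String × String))) : Decidable (Spec_filter_cuts_by_city cuts cities out) := by unfold Spec_filter_cuts_by_city; infer_instance

-- ===== CLAIM (what is proved, stated in full; the proofs are below) =====
def Claim_equal_filter_cuts_by_city : Prop := ∀ (cuts : List (List (String × String))) (cities : List String), Dom_filter_cuts_by_city cuts cities → Pre_filter_cuts_by_city cuts cities → Spec_filter_cuts_by_city cuts cities (filter_cuts_by_city cuts cities)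

-- ===== LEMMAS AND PROOFS =====

-- B's bounded offset scan decides exactly 'sub in s'.
theorem bMatch_eq_isIn (s : List Char) (ups : List (List Char)) :
    bMatchesAtAnyOffset s ups = ups.any (fun sub => PySem.Chars.isIn sub s) := by
  unfold bMatchesAtAnyOffset
  rw [Bool.eq_iff_iff]
  simp only [List.any_eq_true, List.mem_range, PySem.Chars.startswith_iff]
  constructor
  · rintro ⟨i, _, sub, hm, hp⟩
    exact ⟨sub, hm, (PySem.Chars.exists_prefix_drop_iff_isIn sub s).1 ⟨i, hp⟩⟩
  · rintro ⟨sub, hm, hin⟩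
    obtain ⟨j, hj⟩ := (PySem.Chars.exists_prefix_drop_iff_isIn sub s).2 hin
    by_cases hjl : j < s.length + 1
    · exact ⟨j, hjl, sub, hm, hj⟩
    · refine ⟨s.length, by omega, sub, hm, ?_⟩
      have hd : s.drop j = [] := List.drop_eq_nil_of_le (by omega)
      rw [hd] at hj
      simp at hj
      simp [hj]

theorem foldl_if_append_congr {α : Type} (p q : α → Bool) (hpq : ∀ x, p x = q x)
    (xs : List α) (init : List α) :
    xs.foldl (fun acc x => if p x then acc ++ [x] else acc) init
      = xs.foldl (fun acc x => if q x then acc ++ [x] else acc) init := by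
  congr 1
  funext acc x
  rw [hpq]

theorem filter_eq (cuts : List (List (String × String))) (cities : List String) :
    filter_cuts_by_city cuts cities = filter_cuts_by_city_alt cuts cities := by
  unfold filter_cuts_by_city filter_cuts_by_city_alt
  by_cases h : cities = []
  · simp [h]
  · simp only [if_neg h]
    exact foldl_if_append_congr
      (fun cut => (cities.map PySem.Str.upper).any (fun city =>
        PySem.Str.isIn city (PySem.Str.upper (((PySem.Dict.mk cut).get? "location").getD ""))))
      (fun cut => bMatchesAtAnyOffset
        (PySem.Str.upper (((PySem.Dict.mk cut).get? "location").getD "")).toList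
        (cities.map (fun city => (PySem.Str.upper city).toList)))
      (fun cut => by
        beta_reduce
        rw [bMatch_eq_isIn, Bool.eq_iff_iff]
        simp [List.any_map])
      cuts []

-- ===== VERDICT (by name: the statement is the Claim_ definition above) =====
theorem filter_cuts_by_city_spec : Claim_equal_filter_cuts_by_city := by
  intro cuts cities _ _
  unfold Spec_filter_cuts_by_city
  exact filter_eq cuts cities
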